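-- pv_equiv track=rewrite | github.com/ShahzaibSE/programming-problems | codility/arrListLen.py | solution
-- ===== SOURCE A (Python) =====
-- def solution(A):
--     # write your code in Python 3.6
--     try:
--         node_values = []
--         N = len(A)
--         if(N >= 1 and N <= 200000):
--             for i in range(len(A)):
--             #    if(A[i] in range(-1, N-1)):
--                 if(A[i] == i):
--                     continue
--                 elif(A[i] == -1):
--                     break
--                 else:
--                     node_values.append(A[i])
--         return node_values[len(node_values) - 1]
--     except ValueError:
--    # handle ValueError exception
--         pass
--
--     except (TypeError, ZeroDivisionError):
--     # handle multiple exceptions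
--     # TypeError and ZeroDivisionError
--         pass
-- ===== SOURCE B (Python) =====
-- def solution(A):
--     # Backward scan: no survivor list is built. Find the -1 boundary, then
--     # walk right-to-left through the prefix and return immediately at the
--     # first element (from the right) that differs from its index; that is
--     # exactly the last value A would have appended. Returns None where A
--     # raises its uncaught IndexError (empty result / out-of-range N).
--     if not (1 <= len(A) <= 200000):
--         return None
--     try:
--         boundary = A.index(-1)
--     except ValueError:
--         boundary = len(A)
--     for i in range(boundary - 1, -1, -1):
--         if A[i] != i:
--             return A[i]
--     return None
-- ===== Notes on version B (the rewrite author's own statement) =====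
-- stated objective: alternative
-- what changed: A scans forward building a survivor list and indexes its last element; B builds no list at all: it locates the -1 boundary and then scans right-to-left, returning at the first element differing from its index, which is exactly A's last survivor.
import Mathlib
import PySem

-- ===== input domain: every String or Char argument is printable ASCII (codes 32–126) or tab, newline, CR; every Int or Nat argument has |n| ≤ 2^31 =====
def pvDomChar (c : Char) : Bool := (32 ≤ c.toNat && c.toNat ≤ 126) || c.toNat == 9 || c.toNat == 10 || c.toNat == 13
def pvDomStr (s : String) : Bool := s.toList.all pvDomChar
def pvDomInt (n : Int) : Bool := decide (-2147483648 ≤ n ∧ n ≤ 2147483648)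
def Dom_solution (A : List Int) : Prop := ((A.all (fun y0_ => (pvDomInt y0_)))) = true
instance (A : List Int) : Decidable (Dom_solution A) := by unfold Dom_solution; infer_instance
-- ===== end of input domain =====

-- B builds no survivor list: it finds the -1 boundary and scans right-to-left,
-- returning at the first element that differs from its index (A's last survivor);
-- objective: alternative algorithm (return-value equivalence only).

-- ===== PORT A =====
-- the for-loop over range(len(A)) with continue/break and the node_values accumulator
def solutionLoop : List Int → Int → List Int → List Int
  | [], _, acc => acc
  | v :: rest, i, acc =>
    if v = i then solutionLoop rest (i + 1) acc
    else if v = -1 then acc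
    else solutionLoop rest (i + 1) (acc ++ [v])

def solution (A : List Int) : Option Int :=
  let N : Int := A.length
  let node_values : List Int := if 1 ≤ N ∧ N ≤ 200000 then solutionLoop A 0 [] else []
  -- node_values[len(node_values) - 1]; none = the uncaught IndexError (excluded by Pre_)
  PySem.List.pyGet? node_values ((node_values.length : Int) - 1)

-- ===== PORT B =====
-- for i in range(boundary - 1, -1, -1): if A[i] != i: return A[i]
def solutionBack (A : List Int) : Nat → Option Int
  | 0 => none
  | k + 1 =>
    match A[k]? with
    | some v => if v ≠ (k : Int) then some v else solutionBack A k
    | none => none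

def solution_alt (A : List Int) : Option Int :=
  let N : Int := A.length
  if 1 ≤ N ∧ N ≤ 200000 then
    -- boundary = A.index(-1), defaulting to len(A)
    let boundary : Nat :=
      match PySem.List.index? A (-1) with
      | some k => k
      | none => A.length
    solutionBack A boundary
  else none

-- ===== PRECONDITION & SPEC =====
-- Pre_ excludes exactly the inputs on which A raises an uncaught IndexError:
-- the empty list, lists longer than 200000, and lists whose prefix before the
-- first -1 contains no element with A[i] != i (no survivor to return).
def Pre_solution (A : List Int) : Prop :=
  1 ≤ A.length ∧ A.length ≤ 200000 ∧
    ((PySem.List.enumerate (A.takeWhile (fun v => v != -1)) 0).any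
      (fun p => p.2 != p.1)) = true
instance (A : List Int) : Decidable (Pre_solution A) := by unfold Pre_solution; infer_instance

def pvWitness_solution : List Int := [3, 5]

def Spec_solution (A : List Int) (out : Option Int) : Prop := out = solution_alt A
instance (A : List Int) (out : Option Int) : Decidable (Spec_solution A out) := by unfold Spec_solution; infer_instance

-- ===== CLAIM (what is proved, stated in full; the proofs are below) =====
def Claim_equal_solution : Prop := ∀ (A : List Int), Dom_solution A → Pre_solution A → Spec_solution A (solution A)

-- ===== LEMMAS AND PROOFS =====

-- the -1 boundary cuts A exactly at the prefix before the first -1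
theorem take_boundary_eq_takeWhile (A : List Int) :
    A.take (match PySem.List.index? A (-1) with
            | some k => k | none => A.length)
      = A.takeWhile (fun v => v != -1) := by
  induction A with
  | nil => rfl
  | cons v rest ih =>
    by_cases hv : v = -1
    · subst hv
      rw [PySem.List.index?_cons_self]
      simp [List.takeWhile]
    · rw [PySem.List.index?_cons_of_ne rest hv]
      have hkeep : (v != -1) = true := by simpa using hv
      cases hidx : PySem.List.index? rest (-1) with
      | some k =>
        rw [hidx] at ih
        simp [List.takeWhile, hkeep, ← ih]
      | none =>
        rw [hidx] at ih
        simp [List.takeWhile, hkeep, ← ih]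

-- A's accumulator loop computes the filtered enumeration of that prefix
theorem solutionLoop_eq (l : List Int) : ∀ (i : Int) (acc : List Int), 0 ≤ i →
    solutionLoop l i acc
      = acc ++ ((PySem.List.enumerate (l.takeWhile (fun v => v != -1)) i).filter
          (fun p => p.2 != p.1)).map (·.2) := by
  induction l with
  | nil => intro i acc _; simp [solutionLoop, PySem.List.enumerate_nil]
  | cons v rest ih =>
    intro i acc hi
    by_cases hvi : v = i
    · have hv1 : (v != -1) = true := by simp; omega
      simp only [solutionLoop, if_pos hvi, List.takeWhile, hv1]
      rw [PySem.List.enumerate_cons]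
      have : ((i, v).2 != (i, v).1) = false := by simp [hvi]
      simp only [List.filter_cons, this]
      exact ih (i + 1) acc (by omega)
    · by_cases hv1 : v = -1
      · subst hv1
        simp [solutionLoop, hvi, List.takeWhile, PySem.List.enumerate_nil]
      · have hkeep : (v != -1) = true := by simpa using hv1
        simp only [solutionLoop, if_neg hvi, if_neg hv1, List.takeWhile, hkeep]
        rw [PySem.List.enumerate_cons]
        have : ((i, v).2 != (i, v).1) = true := by simpa using hvi
        simp only [List.filter_cons, this, if_pos]
        rw [ih (i + 1) (acc ++ [v]) (by omega)]
        simp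

-- the backward scan returns the last survivor of the first b elements
theorem solutionBack_eq (A : List Int) (b : Nat) (hb : b ≤ A.length) :
    solutionBack A b
      = (((PySem.List.enumerate (A.take b) 0).filter
          (fun p => p.2 != p.1)).map (·.2)).getLast? := by
  induction b with
  | zero => simp [solutionBack, PySem.List.enumerate_nil]
  | succ k ih =>
    have hk : k < A.length := by omega
    have htake : A.take (k + 1) = A.take k ++ [A[k]] := List.take_succ_eq_append_getElem hk
    rw [htake, PySem.List.enumerate_append, List.filter_append, List.map_append]
    have hlen : (A.take k).length = k := by simp [List.length_take]; omega
    rw [hlen]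
    have hget : A[k]? = some A[k] := List.getElem?_eq_getElem hk
    by_cases hv : A[k] = (k : Int)
    · have : ((PySem.List.enumerate [A[k]] ((0:Int) + k)).filter
          (fun p => p.2 != p.1)) = [] := by
        simp [PySem.List.enumerate_cons, PySem.List.enumerate_nil, hv]
      rw [this]
      simp only [List.map_nil, List.append_nil]
      rw [← ih (by omega)]
      simp [solutionBack, hget, hv]
    · have : ((PySem.List.enumerate [A[k]] ((0:Int) + k)).filter
          (fun p => p.2 != p.1)) = [((k : Int), A[k])] := by
        simp [PySem.List.enumerate_cons, PySem.List.enumerate_nil, hv]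
      rw [this]
      simp [solutionBack, hget, hv, List.getLast?_append]

-- indexing a list at length-1 is getLast?
theorem pyGet?_len_sub_one (L : List Int) :
    PySem.List.pyGet? L ((L.length : Int) - 1) = L.getLast? := by
  cases L with
  | nil => exact PySem.List.pyGet?_neg_one []
  | cons x xs =>
    have h : ((x :: xs).length : Int) - 1 = ((xs.length : Nat) : Int) := by
      simp
    rw [h, PySem.List.pyGet?_natCast]
    simp [List.getLast?_eq_getElem?]

-- ===== VERDICT (by name: the statement is the Claim_ definition above) =====
theorem solution_spec : Claim_equal_solution := by
  intro A _ hpre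
  unfold Spec_solution solution solution_alt
  simp only []
  obtain ⟨h1, h2, _⟩ := hpre
  have hg : 1 ≤ (A.length : Int) ∧ (A.length : Int) ≤ 200000 :=
    ⟨by exact_mod_cast h1, by exact_mod_cast h2⟩
  rw [if_pos hg, if_pos hg]
  set b : Nat := (match PySem.List.index? A (-1) with
                  | some k => k | none => A.length) with hbdef
  have hble : b ≤ A.length := by
    rw [hbdef]
    cases hidx : PySem.List.index? A (-1) with
    | none => simp
    | some k =>
      simp only []
      have := PySem.List.getElem_of_index?_eq_some hidx
      obtain ⟨hk, _⟩ := this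
      omega
  rw [solutionBack_eq A b hble, pyGet?_len_sub_one,
      solutionLoop_eq A 0 [] (by omega)]
  have : A.take b = A.takeWhile (fun v => v != -1) := by
    rw [hbdef]; exact take_boundary_eq_takeWhile A
  rw [this]
  simp
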